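-- pv_equiv track=rewrite | github.com/AlexBarker97/Assignments | assignment2_a1_2.py | xx5
-- ===== SOURCE A (Python) =====
-- def xx5(Xmin, Xmax, Ymax):
--     '''Prints values for y=x*x+5 in ranges given using inputs:\n xx5(lower x, upper x, upper y) \n note, lower y default 0'''
--     x = [x for x in range(Xmin, Xmax+1)]
--     y = []
--     OutDomain = []
--     for i in x:
--         y.append(i*i+5)
--     L = len(y)
--     i=0
--     while i < L:
--         if (y[i]) > Ymax:
--             OutDomain.append(i)
--             i+=1
--             continue
--         else:
--             i+=1
--             continue
--     count=0
--     for i in OutDomain: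
--         y.remove(y[i-count])
--         x.remove(x[i-count])
--         count+=1
--     for i in x:
--         return(i,(i*i+5))
-- ===== SOURCE B (Python) =====
-- def xx5(Xmin, Xmax, Ymax):
--     '''Prints values for y=x*x+5 in ranges given using inputs:\n xx5(lower x, upper x, upper y) \n note, lower y default 0'''
--     for i in range(Xmin, Xmax + 1):
--         if i * i + 5 <= Ymax:
--             return (i, i * i + 5)
-- ===== Notes on version B (the rewrite author's own statement) =====
-- stated objective: simpler
-- what changed: B is a single early-return scan over the range that returns the first x with x*x+5 <= Ymax, dropping A's y list, the OutDomain index table and the offset-based value removals entirely.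
import Mathlib
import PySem

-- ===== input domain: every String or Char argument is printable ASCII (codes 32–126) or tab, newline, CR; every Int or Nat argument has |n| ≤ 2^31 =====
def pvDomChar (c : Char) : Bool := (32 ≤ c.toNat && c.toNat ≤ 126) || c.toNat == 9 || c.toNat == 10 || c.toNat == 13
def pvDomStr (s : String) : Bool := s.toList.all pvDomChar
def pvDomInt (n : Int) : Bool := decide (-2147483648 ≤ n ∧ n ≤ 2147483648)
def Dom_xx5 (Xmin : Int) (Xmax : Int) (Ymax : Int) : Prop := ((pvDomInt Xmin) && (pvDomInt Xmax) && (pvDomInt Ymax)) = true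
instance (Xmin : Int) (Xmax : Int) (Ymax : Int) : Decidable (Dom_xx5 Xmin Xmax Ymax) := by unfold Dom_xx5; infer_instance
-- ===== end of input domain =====

-- B replaces A's list building, index table and offset value-removals with a single
-- early-return scan for the first x in the range with x*x+5 <= Ymax (return value only; A mutates no argument).


-- ===== PORT A =====
-- the 'while i < L' loop building OutDomain
def xx5OdLoop (y : List Int) (Ymax : Int) (L : Nat) (i : Nat) (acc : List Int) : List Int :=
  if i < L then
    match PySem.List.pyGet? y (i : Int) with
    | some v =>
        if v > Ymax then xx5OdLoop y Ymax L (i + 1) (acc ++ [(i : Int)])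
        else xx5OdLoop y Ymax L (i + 1) acc
    | none => acc  -- unreachable: i < L = len(y), so y[i] never raises
  else acc
termination_by L - i

-- one iteration of 'for i in OutDomain: y.remove(y[i-count]); x.remove(x[i-count]); count+=1'
def xx5RemStep (s : List Int × List Int × Int) (i : Int) : List Int × List Int × Int :=
  match PySem.List.pyGet? s.1 (i - s.2.2), PySem.List.pyGet? s.2.1 (i - s.2.2) with
  | some vy, some vx =>
      match PySem.List.remove? s.1 vy, PySem.List.remove? s.2.1 vx with
      | some y', some x' => (y', x', s.2.2 + 1)
      | _, _ => (s.1, s.2.1, s.2.2 + 1)  -- unreachable: the element just read is present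
  | _, _ => (s.1, s.2.1, s.2.2 + 1)      -- unreachable: i - count is always in range

def xx5 (Xmin : Int) (Xmax : Int) (Ymax : Int) : Option (Int × Int) :=
  let x := PySem.List.pyRange Xmin (Xmax + 1) 1
  let y := x.foldl (fun acc i => acc ++ [i * i + 5]) []
  let L := y.length
  let OutDomain := xx5OdLoop y Ymax L 0 []
  let s := OutDomain.foldl xx5RemStep (y, x, 0)
  match s.2.1 with            -- 'for i in x: return (i, i*i+5)' — falls through to None on []
  | [] => none
  | i :: _ => some (i, i * i + 5)

-- ===== PORT B =====
def xx5_alt (Xmin : Int) (Xmax : Int) (Ymax : Int) : Option (Int × Int) :=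
  (PySem.List.pyRange Xmin (Xmax + 1) 1).findSome?
    (fun i => if i * i + 5 ≤ Ymax then some (i, i * i + 5) else none)

-- ===== PRECONDITION & SPEC =====
def Spec_xx5 (Xmin : Int) (Xmax : Int) (Ymax : Int) (out : Option (Int × Int)) : Prop := out = xx5_alt Xmin Xmax Ymax
instance (Xmin : Int) (Xmax : Int) (Ymax : Int) (out : Option (Int × Int)) : Decidable (Spec_xx5 Xmin Xmax Ymax out) := by unfold Spec_xx5; infer_instance

-- ===== CLAIM (what is proved, stated in full; the proofs are below) =====
def Claim_equal_xx5 : Prop := ∀ (Xmin : Int) (Xmax : Int) (Ymax : Int), Dom_xx5 Xmin Xmax Ymax → Spec_xx5 Xmin Xmax Ymax (xx5 Xmin Xmax Ymax)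

-- ===== LEMMAS AND PROOFS =====

-- positions (as Python ints, offset k) of the elements satisfying p
def posWhere (p : Int → Bool) : List Int → Nat → List Int
  | [], _ => []
  | a :: t, k => if p a then (k : Int) :: posWhere p t (k + 1) else posWhere p t (k + 1)

theorem foldl_app_sing (f : Int → Int) : ∀ (l : List Int) (acc : List Int),
    l.foldl (fun acc i => acc ++ [f i]) acc = acc ++ l.map f := by
  intro l
  induction l with
  | nil => simp
  | cons a t ih => intro acc; simp [List.foldl, ih]

theorem odLoop_eq (Ymax : Int) : ∀ (suf pre acc : List Int),
    xx5OdLoop (pre ++ suf) Ymax (pre ++ suf).length pre.length acc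
      = acc ++ posWhere (fun v => v > Ymax) suf pre.length := by
  intro suf
  induction suf with
  | nil => intro pre acc; simp [xx5OdLoop, posWhere]
  | cons a t ih =>
    intro pre acc
    rw [xx5OdLoop]
    have hlt : pre.length < (pre ++ a :: t).length := by simp
    rw [if_pos hlt, PySem.List.pyGet?_append_length]
    dsimp only
    have happ : pre ++ a :: t = (pre ++ [a]) ++ t := by simp
    have hlen : pre.length + 1 = (pre ++ [a]).length := by simp
    by_cases hp : a > Ymax
    · rw [if_pos hp]
      rw [hlen, happ, ih (pre ++ [a])]
      simp [posWhere, hp]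
    · rw [if_neg hp]
      rw [hlen, happ, ih (pre ++ [a])]
      simp [posWhere, hp]

theorem posWhere_map (p : Int → Bool) (f : Int → Int) : ∀ (l : List Int) (k : Nat),
    posWhere p (l.map f) k = posWhere (fun i => p (f i)) l k := by
  intro l
  induction l with
  | nil => intro k; simp [posWhere]
  | cons a t ih => intro k; simp [posWhere, ih]

theorem remove?_append_cons (v : Int) : ∀ (l1 l2 : List Int), v ∉ l1 →
    PySem.List.remove? (l1 ++ v :: l2) v = some (l1 ++ l2) := by
  intro l1
  induction l1 with
  | nil => intro l2 _; simp [PySem.List.remove?_cons_self]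
  | cons a t ih =>
    intro l2 hv
    have hne : a ≠ v := fun h => hv (by simp [h])
    have hvt : v ∉ t := fun h => hv (by simp [h])
    rw [List.cons_append, PySem.List.remove?_cons_of_ne _ hne, ih l2 hvt]
    simp

theorem remLoop_eq (Ymax : Int) : ∀ (suf pre : List Int) (k : Nat),
    pre.length ≤ k →
    (∀ b ∈ pre, b * b + 5 ≤ Ymax) →
    (pre ++ suf).Nodup →
    (posWhere (fun i => i * i + 5 > Ymax) suf k).foldl xx5RemStep
        ((pre ++ suf).map (fun i => i * i + 5), pre ++ suf, (k : Int) - pre.length)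
      = ((pre ++ suf.filter (fun i => !(i * i + 5 > Ymax))).map (fun i => i * i + 5),
         pre ++ suf.filter (fun i => !(i * i + 5 > Ymax)),
         (k : Int) + suf.countP (fun i => i * i + 5 > Ymax) - pre.length) := by
  intro suf
  induction suf with
  | nil => intro pre k _ _ _; simp [posWhere]
  | cons a t ih =>
    intro pre k hk hpre hnd
    by_cases hp : a * a + 5 > Ymax
    · -- removal step at current position pre.length
      have hstep :
          xx5RemStep ((pre ++ a :: t).map (fun i => i * i + 5), pre ++ a :: t,
              (k : Int) - pre.length) (k : Int)
            = ((pre ++ t).map (fun i => i * i + 5), pre ++ t, ((k : Int) - pre.length) + 1) := by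
        unfold xx5RemStep
        have hidx : (k : Int) - ((k : Int) - (pre.length : Int)) = (pre.length : Int) := by omega
        have hy : PySem.List.pyGet? ((pre ++ a :: t).map (fun i => i * i + 5))
            ((pre.length : Int)) = some (a * a + 5) := by
          have : (pre ++ a :: t).map (fun i => i * i + 5)
              = (pre.map (fun i => i * i + 5)) ++ (a * a + 5) :: (t.map (fun i => i * i + 5)) := by
            simp
          rw [this]
          have hl : (pre.map (fun i => i * i + 5)).length = pre.length := by simp
          rw [← hl]
          exact PySem.List.pyGet?_append_length _ _ _
        have hx : PySem.List.pyGet? (pre ++ a :: t) ((pre.length : Int)) = some a :=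
          PySem.List.pyGet?_append_length _ _ _
        have hfa : (a * a + 5) ∉ pre.map (fun i => i * i + 5) := by
          intro hmem
          rcases List.mem_map.mp hmem with ⟨b, hb, hbe⟩
          have := hpre b hb
          omega
        have hay : PySem.List.remove? ((pre ++ a :: t).map (fun i => i * i + 5)) (a * a + 5)
            = some ((pre ++ t).map (fun i => i * i + 5)) := by
          have he : (pre ++ a :: t).map (fun i => i * i + 5)
              = (pre.map (fun i => i * i + 5)) ++ (a * a + 5) :: (t.map (fun i => i * i + 5)) := by
            simp
          rw [he, remove?_append_cons _ _ _ hfa]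
          simp
        have hanp : a ∉ pre := by
          intro h
          rw [List.nodup_append] at hnd
          exact hnd.2.2 a h a List.mem_cons_self rfl
        have hax : PySem.List.remove? (pre ++ a :: t) a = some (pre ++ t) :=
          remove?_append_cons _ _ _ hanp
        simp only [hidx, hy, hx, hay, hax]
      have hnd' : (pre ++ t).Nodup := by
        have : (pre ++ t).Sublist (pre ++ a :: t) := by
          exact List.Sublist.append (List.Sublist.refl _) (List.sublist_cons_self a t)
        exact this.nodup hnd
      have ihr := ih pre (k + 1) (by omega) hpre hnd'
      simp only [posWhere, if_pos (show decide (a * a + 5 > Ymax) = true by simp [hp]),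
        List.foldl_cons, hstep]
      have hc : ((k : Int) - pre.length) + 1 = ((k + 1 : Nat) : Int) - pre.length := by
        push_cast; omega
      rw [hc, ihr]
      have hfil : (a :: t).filter (fun i => !(i * i + 5 > Ymax))
          = t.filter (fun i => !(i * i + 5 > Ymax)) := by
        simp [hp]
      rw [hfil]
      simp only [List.countP_cons, Prod.mk.injEq]
      refine ⟨trivial, trivial, ?_⟩
      simp only [show (decide (a * a + 5 > Ymax)) = true by simp [hp], if_true]
      push_cast
      omega
    · have happ : pre ++ a :: t = (pre ++ [a]) ++ t := by simp
      have hlen : (pre ++ [a]).length = pre.length + 1 := by simp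
      have hpre' : ∀ b ∈ pre ++ [a], b * b + 5 ≤ Ymax := by
        intro b hb
        rcases List.mem_append.mp hb with h | h
        · exact hpre b h
        · simp at h; subst h; omega
      have ihr := ih (pre ++ [a]) (k + 1) (by simp; omega) hpre' (by rw [← happ]; exact hnd)
      simp only [posWhere, if_neg (show ¬ (decide (a * a + 5 > Ymax) = true) by simp [hp])]
      have hc : (k : Int) - pre.length = ((k + 1 : Nat) : Int) - (pre ++ [a]).length := by
        rw [hlen]; push_cast; omega
      rw [hc, happ, ihr]
      have hfa : (a :: t).filter (fun i => !(i * i + 5 > Ymax))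
          = a :: t.filter (fun i => !(i * i + 5 > Ymax)) := by
        simp [hp]
      rw [hfa]
      simp only [List.countP_cons, hlen, List.append_assoc, List.singleton_append,
        Prod.mk.injEq]
      refine ⟨trivial, trivial, ?_⟩
      simp only [show (decide (a * a + 5 > Ymax)) = false by simp [hp]]
      push_cast
      omega

theorem findSome?_eq_filter_head (Ymax : Int) : ∀ (l : List Int),
    l.findSome? (fun i => if i * i + 5 ≤ Ymax then some (i, i * i + 5) else none)
      = (match l.filter (fun i => !(i * i + 5 > Ymax)) with
         | [] => none
         | i :: _ => some (i, i * i + 5)) := by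
  intro l
  induction l with
  | nil => simp
  | cons a t ih =>
    by_cases hp : a * a + 5 ≤ Ymax
    · simp [List.findSome?, List.filter, hp, show ¬ (a * a + 5 > Ymax) by omega]
    · simp only [List.findSome?, if_neg hp]
      rw [ih]
      simp [List.filter, show a * a + 5 > Ymax by omega]

-- ===== VERDICT (by name: the statement is the Claim_ definition above) =====
theorem xx5_spec : Claim_equal_xx5 := by
  intro Xmin Xmax Ymax _
  unfold Spec_xx5 xx5 xx5_alt
  set xs := PySem.List.pyRange Xmin (Xmax + 1) 1 with hxs
  have hy : xs.foldl (fun acc i => acc ++ [i * i + 5]) [] = xs.map (fun i => i * i + 5) := by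
    simpa using foldl_app_sing (fun i => i * i + 5) xs []
  have hod : xx5OdLoop (xs.map (fun i => i * i + 5)) Ymax (xs.map (fun i => i * i + 5)).length 0 []
      = posWhere (fun i => i * i + 5 > Ymax) xs 0 := by
    have h := odLoop_eq Ymax (xs.map (fun i => i * i + 5)) [] []
    simp only [List.nil_append, List.length_nil] at h
    rw [h, posWhere_map]
  have hnd : xs.Nodup := PySem.List.nodup_pyRange_one Xmin (Xmax + 1)
  have hrem := remLoop_eq Ymax xs [] 0 (by simp) (by simp) (by simpa using hnd)
  simp only [List.nil_append, List.length_nil] at hrem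
  simp only [hy, hod]
  norm_num at hrem
  rw [hrem]
  rw [findSome?_eq_filter_head]
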